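-- pv_equiv track=rewrite | github.com/achaykovsky/python_exercises | drone-flight-planner/trivial_solution.py | drone_flight_planner
-- ===== SOURCE A (Python) =====
-- from typing import List
--
-- def drone_flight_planner(route: List[List[int]]) -> int:
--     route = [z for _, _, z in route]
--     diffs = 0
--     l = 0
--     for r in range(len(route)):
--         if (route[r] > route[l]):
--             diffs += (route[r] - route[l])  # adding to the sum all the differnces above the first entry
--             l = r  # setting the new max
--     return diffs
-- ===== SOURCE B (Python) =====
-- from typing import List
--
-- def drone_flight_planner(route: List[List[int]]) -> int:
--     zs = [z for _, _, z in route]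
--     if not zs:
--         return 0
--     return max(zs) - zs[0]
-- ===== Notes on version B (the rewrite author's own statement) =====
-- stated objective: simpler
-- what changed: A's pointer/accumulator scan telescopes to a closed form: B returns max(zs) - zs[0] (0 for an empty route) instead of summing increases over a running maximum.
import Mathlib
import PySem

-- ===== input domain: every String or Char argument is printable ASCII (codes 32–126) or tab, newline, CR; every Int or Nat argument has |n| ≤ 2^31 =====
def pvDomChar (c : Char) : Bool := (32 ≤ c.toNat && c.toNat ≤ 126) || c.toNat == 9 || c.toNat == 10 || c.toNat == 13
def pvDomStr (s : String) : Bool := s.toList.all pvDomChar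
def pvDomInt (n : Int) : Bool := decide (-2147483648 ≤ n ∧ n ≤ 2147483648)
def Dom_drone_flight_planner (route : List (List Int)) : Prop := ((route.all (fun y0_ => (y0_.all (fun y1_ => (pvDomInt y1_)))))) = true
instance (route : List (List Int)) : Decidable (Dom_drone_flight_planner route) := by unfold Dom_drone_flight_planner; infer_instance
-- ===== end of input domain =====

-- B replaces A's running-maximum pointer scan by the closed form max(zs) - zs[0] (0 on empty).

-- ===== PORT A =====
-- one loop iteration: if route[r] > route[l] then diffs += route[r]-route[l]; l = r
def pvStepA (zs : List Int) (st : Int × Int) (r : Int) : Int × Int :=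
  if PySem.List.pyGetD zs r 0 > PySem.List.pyGetD zs st.2 0 then
    (st.1 + (PySem.List.pyGetD zs r 0 - PySem.List.pyGetD zs st.2 0), r)
  else st

def drone_flight_planner (route : List (List Int)) : Int :=
  -- 'for _, _, z in route' (rows have length 3 under Pre_; pyGetD default unreachable there)
  let zs := route.map (fun r => PySem.List.pyGetD r 2 0)
  ((PySem.List.pyRange 0 (PySem.List.len zs) 1).foldl (pvStepA zs) (0, 0)).1

-- ===== PORT B =====
def drone_flight_planner_alt (route : List (List Int)) : Int :=
  let zs := route.map (fun r => PySem.List.pyGetD r 2 0)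
  match PySem.List.max? zs (fun y => y) with
  | none => 0                      -- empty route
  | some m => m - zs.headD 0       -- max(zs) - zs[0]

-- ===== PRECONDITION & SPEC =====
-- A's unpacking 'for _, _, z in route' raises ValueError unless every row has exactly 3 entries.
def Pre_drone_flight_planner (route : List (List Int)) : Prop :=
  ∀ r ∈ route, r.length = 3
instance (route : List (List Int)) : Decidable (Pre_drone_flight_planner route) := by
  unfold Pre_drone_flight_planner; infer_instance
def pvWitness_drone_flight_planner : List (List Int) := [[0, 0, 5], [1, 1, 3], [2, 2, 9]]

def Spec_drone_flight_planner (route : List (List Int)) (out : Int) : Prop := out = drone_flight_planner_alt route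
instance (route : List (List Int)) (out : Int) : Decidable (Spec_drone_flight_planner route out) := by unfold Spec_drone_flight_planner; infer_instance

-- ===== CLAIM (what is proved, stated in full; the proofs are below) =====
def Claim_equal_drone_flight_planner : Prop := ∀ (route : List (List Int)), Dom_drone_flight_planner route → Pre_drone_flight_planner route → Spec_drone_flight_planner route (drone_flight_planner route)

-- ===== LEMMAS AND PROOFS =====

-- loop invariant: after scanning indices 0..n, diffs = (prefix max) - zs[0] and l points at the max
lemma loopA_inv (z : Int) (t : List Int) (n : Nat) (hn : n ≤ t.length) :
    ∃ l : Nat, l ≤ n ∧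
      (PySem.List.pyRange 0 ((n : Int) + 1) 1).foldl (pvStepA (z :: t)) (0, 0)
        = ((t.take n).foldl max z - z, (l : Int)) ∧
      PySem.List.pyGetD (z :: t) (l : Int) 0 = (t.take n).foldl max z := by
  induction n with
  | zero =>
    refine ⟨0, le_refl _, ?_, ?_⟩
    · have h1 : PySem.List.pyRange 0 1 1 = [0] := by
        have := PySem.List.pyRange_one_singleton (a := (0 : Int)); simpa using this
      simp only [Nat.cast_zero, zero_add]
      rw [h1]; simp [pvStepA]
    · simp [PySem.List.pyGetD_zero_cons]
  | succ n ih =>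
    obtain ⟨l, hl, hfold, hget⟩ := ih (by omega)
    have hnt : n < t.length := by omega
    have hv : PySem.List.pyGetD (z :: t) ((n : Int) + 1) 0 = t[n] := by
      have hc : ((n : Int) + 1) = ((n + 1 : Nat) : Int) := by push_cast; ring
      rw [hc, PySem.List.pyGetD_natCast, List.getD_cons_succ]
      exact List.getD_eq_getElem t 0 hnt
    have hsplit : PySem.List.pyRange 0 ((n : Int) + 1 + 1) 1
        = PySem.List.pyRange 0 ((n : Int) + 1) 1 ++ [(n : Int) + 1] := by
      have := PySem.List.pyRange_one_succ_right (a := 0) (b := (n : Int) + 1) (by omega)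
      simpa using this
    have htake : t.take (n + 1) = t.take n ++ [t[n]] := by
      rw [List.take_add_one]
      simp [List.getElem?_eq_getElem hnt]
    have hfmax : (t.take (n + 1)).foldl max z = max ((t.take n).foldl max z) t[n] := by
      rw [htake, List.foldl_append]; rfl
    have hpush : ((n : Int) + 1 + 1) = (((n : Nat) + 1 : Nat) : Int) + 1 := by push_cast; ring
    rw [hpush] at hsplit
    by_cases hgt : t[n] > (t.take n).foldl max z
    · refine ⟨n + 1, le_refl _, ?_, ?_⟩
      · rw [hsplit, List.foldl_append, hfold]
        simp only [List.foldl_cons, List.foldl_nil, pvStepA, hv, hget]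
        rw [if_pos hgt, hfmax, max_eq_right (le_of_lt hgt), Prod.mk.injEq]
        exact ⟨by ring, by push_cast; ring⟩
      · rw [hfmax, max_eq_right (le_of_lt hgt)]
        exact_mod_cast hv
    · refine ⟨l, by omega, ?_, ?_⟩
      · rw [hsplit, List.foldl_append, hfold]
        simp only [List.foldl_cons, List.foldl_nil, pvStepA, hv, hget]
        rw [if_neg hgt, hfmax, max_eq_left (by omega)]
      · rw [hfmax, max_eq_left (by omega)]
        exact hget

-- both ports only look at the extracted z-column; on it A's loop equals B's closed form
lemma core_eq (zs : List Int) :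
    ((PySem.List.pyRange 0 (PySem.List.len zs) 1).foldl (pvStepA zs) (0, 0)).1
      = match PySem.List.max? zs (fun y => y) with
        | none => 0
        | some m => m - zs.headD 0 := by
  cases zs with
  | nil => simp [PySem.List.max?, PySem.List.pyRange_one_eq_nil]
  | cons z t =>
    obtain ⟨l, _, hfold, _⟩ := loopA_inv z t t.length (le_refl _)
    rw [PySem.List.max?_id_cons]
    have hlen : PySem.List.len (z :: t) = (t.length : Int) + 1 := by
      simp [PySem.List.len_eq]
    rw [hlen, hfold]
    simp

-- ===== VERDICT (by name: the statement is the Claim_ definition above) =====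
theorem drone_flight_planner_spec : Claim_equal_drone_flight_planner := by
  intro route _ _
  unfold Spec_drone_flight_planner drone_flight_planner drone_flight_planner_alt
  exact core_eq _
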